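-- pv_equiv track=rewrite | github.com/ggggggggg/2pac | 2pacgui_qt.py | get_arrow_char_index
-- ===== SOURCE A (Python) =====
-- def get_arrow_char_index(s2, plus=0):
--     lines = s2.split('\n')
--     char_index = 0
--
--     for line in lines:
--         if line.startswith('-->'):
--             return min(char_index+plus, len(s2)-1)
--         # Add length of line + 1 for the newline character
--         char_index += len(line) + 1
--
--     return 0  # Not found
-- ===== SOURCE B (Python) =====
-- def get_arrow_char_index(s2, plus=0):
--     # Single substring search instead of splitting into lines and accumulating offsets.
--     if s2.startswith('-->'):
--         start = 0
--     else:
--         i = s2.find('\n-->')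
--         if i == -1:
--             return 0  # Not found
--         start = i + 1
--     return min(start + plus, len(s2) - 1)
-- ===== Notes on version B (the rewrite author's own statement) =====
-- stated objective: idiomatic
-- what changed: Replaces the split-into-lines loop with per-line offset accounting by one str.find of the newline-plus-arrow pattern (plus a startswith check for a match on the first line), reading the matched line's offset directly from the search result.
import Mathlib
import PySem

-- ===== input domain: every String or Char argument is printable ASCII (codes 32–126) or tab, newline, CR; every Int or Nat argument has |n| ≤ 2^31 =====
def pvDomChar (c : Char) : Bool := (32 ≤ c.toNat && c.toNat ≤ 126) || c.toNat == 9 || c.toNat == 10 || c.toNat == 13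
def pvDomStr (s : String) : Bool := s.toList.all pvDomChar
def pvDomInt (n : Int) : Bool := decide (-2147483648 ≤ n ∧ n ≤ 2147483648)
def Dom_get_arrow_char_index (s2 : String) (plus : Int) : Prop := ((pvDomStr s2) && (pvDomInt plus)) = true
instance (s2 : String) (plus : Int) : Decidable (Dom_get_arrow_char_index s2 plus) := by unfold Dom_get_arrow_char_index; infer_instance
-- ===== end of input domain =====

-- B replaces A's split-into-lines loop with per-line offset accounting by one substring
-- search for "\n-->" (plus a startswith check for a match at offset 0); same return value.

-- ===== PORT A =====
-- the for-loop over the lines of s2.split('\n'), carrying char_index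
def gaciLoop (s2 : String) (plus : Int) : List (List Char) → Int → Int
  | [], _ => 0  -- Not found
  | line :: rest, charIndex =>
    if PySem.Chars.startswith line ['-', '-', '>'] then
      min (charIndex + plus) (PySem.Str.len s2 - 1)
    else
      gaciLoop s2 plus rest (charIndex + (PySem.Chars.len line : Int) + 1)

-- s2.split('\n') with the nonempty literal separator is PySem.Chars.splitOn on the code points
def get_arrow_char_index (s2 : String) (plus : Int) : Int :=
  gaciLoop s2 plus (PySem.Chars.splitOn s2.toList ['\n']) 0

-- ===== PORT B =====
def get_arrow_char_index_alt (s2 : String) (plus : Int) : Int :=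
  if PySem.Str.startswith s2 "-->" then
    min (0 + plus) (PySem.Str.len s2 - 1)
  else
    let i := PySem.Str.find s2 "\n-->"
    if i = -1 then 0  -- Not found
    else min (i + 1 + plus) (PySem.Str.len s2 - 1)

-- ===== PRECONDITION & SPEC =====
def Spec_get_arrow_char_index (s2 : String) (plus : Int) (out : Int) : Prop := out = get_arrow_char_index_alt s2 plus
instance (s2 : String) (plus : Int) (out : Int) : Decidable (Spec_get_arrow_char_index s2 plus out) := by unfold Spec_get_arrow_char_index; infer_instance

-- ===== CLAIM (what is proved, stated in full; the proofs are below) =====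
def Claim_equal_get_arrow_char_index : Prop := ∀ (s2 : String) (plus : Int), Dom_get_arrow_char_index s2 plus → Spec_get_arrow_char_index s2 plus (get_arrow_char_index s2 plus)

-- ===== LEMMAS AND PROOFS =====

-- clean structural model of splitting on '\n'
def mySplit : List Char → List (List Char)
  | [] => [[]]
  | c :: rest =>
    if c = '\n' then [] :: mySplit rest
    else (c :: (mySplit rest).headI) :: (mySplit rest).tail

theorem mySplit_eq_cons (l : List Char) :
    mySplit l = (mySplit l).headI :: (mySplit l).tail := by
  cases l with
  | nil => rfl
  | cons c rest =>
    simp only [mySplit]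
    split_ifs <;> rfl

theorem go_eq_mySplit (fuel : Nat) (l cur : List Char) (acc : List (List Char))
    (h : l.length ≤ fuel) :
    PySem.Chars.splitOn.go ['\n'] fuel l cur acc
      = acc.reverse ++ (cur.reverse ++ (mySplit l).headI) :: (mySplit l).tail := by
  induction fuel generalizing l cur acc with
  | zero =>
    have : l = [] := List.length_eq_zero_iff.mp (Nat.le_zero.mp h)
    subst this
    simp [PySem.Chars.splitOn.go, mySplit]
  | succ fuel ih =>
    cases l with
    | nil => simp [PySem.Chars.splitOn.go, mySplit]
    | cons c rest =>
      by_cases hc : c = '\n'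
      · subst hc
        have hpre : (['\n'] : List Char).isPrefixOf ('\n' :: rest) = true := by
          simp [List.isPrefixOf]
        rw [PySem.Chars.splitOn.go, if_pos hpre]
        have := ih rest [] (cur.reverse :: acc) (by simpa using Nat.lt_succ_iff.mp (by simpa using h))
        simp only [List.length_singleton, List.drop_succ_cons, List.drop_zero]
        simp only [List.reverse_nil, List.nil_append] at this
        rw [this, ← mySplit_eq_cons rest]
        simp [mySplit]
      · have hpre : (['\n'] : List Char).isPrefixOf (c :: rest) = false := by
          simp [List.isPrefixOf]
          exact fun h => absurd h.symm hc
        rw [PySem.Chars.splitOn.go, if_neg (by simp [hpre])]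
        have := ih rest (c :: cur) acc (by simpa using Nat.lt_succ_iff.mp (by simpa using h))
        rw [this]
        simp [mySplit, hc]

theorem splitOn_eq_mySplit (cs : List Char) :
    PySem.Chars.splitOn cs ['\n'] = mySplit cs := by
  have h := go_eq_mySplit (cs.length + 1) cs [] [] (by omega)
  rw [PySem.Chars.splitOn] at *
  rw [h]
  simpa using (mySplit_eq_cons cs).symm

theorem mySplit_no_nl (l : List Char) (h : '\n' ∉ l) : mySplit l = [l] := by
  induction l with
  | nil => rfl
  | cons c rest ih =>
    simp only [List.mem_cons, not_or] at h
    simp [mySplit, Ne.symm h.1, ih h.2]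

theorem mySplit_append_nl (pre rest : List Char) (h : '\n' ∉ pre) :
    mySplit (pre ++ '\n' :: rest) = pre :: mySplit rest := by
  induction pre with
  | nil => simp [mySplit]
  | cons c pre' ih =>
    simp only [List.mem_cons, not_or] at h
    simp [mySplit, Ne.symm h.1, ih h.2]

-- find points at n when there is an occurrence at n and none before it
theorem find_eq_of (s sub : List Char) (n : Nat)
    (h1 : sub <+: s.drop n) (h2 : ∀ i, i < n → ¬ sub <+: s.drop i) :
    PySem.Chars.find s sub = (n : Int) := by
  have hinfix : sub <:+: s := h1.isInfix.trans (s.drop_suffix n).isInfix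
  have hnn : 0 ≤ PySem.Chars.find s sub := (PySem.Chars.find_nonneg_iff s sub).mpr hinfix
  obtain ⟨hp, hmin⟩ := PySem.Chars.find_spec hnn
  have heq : (PySem.Chars.find s sub).toNat = n := by
    rcases lt_trichotomy (PySem.Chars.find s sub).toNat n with hlt | heq | hgt
    · exact absurd hp (h2 _ hlt)
    · exact heq
    · exact absurd h1 (hmin n hgt)
  omega

-- a "\n…" pattern can only match where the string has a '\n'
theorem head_nl_of_prefix (t l : List Char) (h : ('\n' :: t) <+: l) :
    l.head? = some '\n' := by
  obtain ⟨u, hu⟩ := h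
  subst hu; rfl

theorem no_occ_in_pre (pre x : List Char) (hpre : '\n' ∉ pre) (i : Nat)
    (hi : i < pre.length) (t : List Char) :
    ¬ ('\n' :: t) <+: (pre ++ x).drop i := by
  intro h
  rw [List.drop_append_of_le_length (Nat.le_of_lt hi)] at h
  have hh := head_nl_of_prefix _ _ h
  have hne : pre.drop i ≠ [] := by
    intro hnil
    have := List.drop_eq_nil_iff.mp hnil
    omega
  rw [List.head?_append_of_ne_nil _ hne, List.head?_drop] at hh
  have hgm : pre[i] ∈ pre := pre.getElem_mem hi
  have : pre[i] = '\n' := by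
    have : pre[i]? = some '\n' := by simpa [List.getElem?_eq_getElem hi] using hh
    simpa [List.getElem?_eq_getElem hi] using this
  rw [this] at hgm
  exact hpre hgm

-- "-->" is a prefix of pre ++ '\n' :: rest iff it is a prefix of pre
theorem arrow_prefix_append (pre rest : List Char) :
    (['-', '-', '>'] <+: pre ++ '\n' :: rest) ↔ (['-', '-', '>'] <+: pre) := by
  constructor
  · intro h
    by_cases hlen : 3 ≤ pre.length
    · rw [List.prefix_iff_eq_take] at h ⊢
      rwa [List.take_append_of_le_length (by simpa using hlen)] at h
    · exfalso
      have htake : (['-', '-', '>'] : List Char) = (pre ++ '\n' :: rest).take 3 :=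
        List.prefix_iff_eq_take.mp h
      have hlt : pre.length < 3 := by omega
      have hlen3 : pre.length < ((pre ++ '\n' :: rest).take 3).length := by
        simp only [List.length_take, List.length_append, List.length_cons]
        omega
      have hval : ((pre ++ '\n' :: rest).take 3)[pre.length]'hlen3 = '\n' := by
        rw [List.getElem_take]
        simp
      have hmem : '\n' ∈ (pre ++ '\n' :: rest).take 3 :=
        List.mem_of_getElem hval
      rw [← htake] at hmem
      simp at hmem
  · intro h
    exact h.trans (pre.prefix_append _)

-- the first line starts with "-->" iff the whole string does
theorem startswith_of_split (pre rest : List Char) :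
    PySem.Chars.startswith (pre ++ '\n' :: rest) ['-', '-', '>']
      = PySem.Chars.startswith pre ['-', '-', '>'] := by
  by_cases h : ['-', '-', '>'] <+: pre
  · rw [(PySem.Chars.startswith_iff _ _).mpr h,
      (PySem.Chars.startswith_iff _ _).mpr ((arrow_prefix_append pre rest).mpr h)]
  · have h1 : PySem.Chars.startswith pre ['-', '-', '>'] = false := by
      rw [Bool.eq_false_iff]
      exact fun hb => h ((PySem.Chars.startswith_iff _ _).mp hb)
    have h2 : PySem.Chars.startswith (pre ++ '\n' :: rest) ['-', '-', '>'] = false := by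
      rw [Bool.eq_false_iff]
      exact fun hb =>
        h ((arrow_prefix_append pre rest).mp ((PySem.Chars.startswith_iff _ _).mp hb))
    rw [h1, h2]

-- where the first "\n-->" occurrence sits in pre ++ '\n' :: rest
theorem find_split_hit (pre rest : List Char) (hpre : '\n' ∉ pre)
    (hr : ['-', '-', '>'] <+: rest) :
    PySem.Chars.find (pre ++ '\n' :: rest) ['\n', '-', '-', '>'] = (pre.length : Int) := by
  apply find_eq_of
  · rw [List.drop_left]
    simpa using hr
  · intro i hi
    exact no_occ_in_pre pre _ hpre i hi _

theorem drop_big (pre rest : List Char) (k : Nat) :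
    (pre ++ '\n' :: rest).drop (pre.length + 1 + k) = rest.drop k := by
  rw [show pre.length + 1 + k = pre.length + (1 + k) by omega, List.drop_append]
  rw [List.drop_eq_nil_of_le (by omega), List.nil_append,
    show pre.length + (1 + k) - pre.length = k + 1 by omega, List.drop_succ_cons]

theorem find_split_miss_none (pre rest : List Char) (hpre : '\n' ∉ pre)
    (hr : ¬ ['-', '-', '>'] <+: rest)
    (hf : PySem.Chars.find rest ['\n', '-', '-', '>'] = -1) :
    PySem.Chars.find (pre ++ '\n' :: rest) ['\n', '-', '-', '>'] = -1 := by
  rw [PySem.Chars.find_eq_neg_one_iff _ _] at hf ⊢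
  intro hinf
  have : PySem.Chars.isIn ['\n', '-', '-', '>'] (pre ++ '\n' :: rest) = true :=
    (PySem.Chars.isIn_iff_infix _ _).mpr hinf
  obtain ⟨j, hj⟩ := (PySem.Chars.exists_prefix_drop_iff_isIn _ _).mpr this
  rcases lt_trichotomy j pre.length with h | h | h
  · exact no_occ_in_pre pre _ hpre j h _ hj
  · subst h
    rw [List.drop_left] at hj
    exact hr (by simpa using hj)
  · have hk : j = pre.length + 1 + (j - pre.length - 1) := by omega
    rw [hk, drop_big] at hj
    exact hf (hj.isInfix.trans (rest.drop_suffix _).isInfix)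

theorem find_split_miss_some (pre rest : List Char) (hpre : '\n' ∉ pre)
    (hr : ¬ ['-', '-', '>'] <+: rest)
    (hf : PySem.Chars.find rest ['\n', '-', '-', '>'] ≠ -1) :
    PySem.Chars.find (pre ++ '\n' :: rest) ['\n', '-', '-', '>']
      = (pre.length : Int) + 1 + PySem.Chars.find rest ['\n', '-', '-', '>'] := by
  have hnn : 0 ≤ PySem.Chars.find rest ['\n', '-', '-', '>'] := by
    rcases (PySem.Chars.neg_one_le_find rest ['\n', '-', '-', '>']).lt_or_eq with h | h
    · omega
    · exact absurd h.symm hf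
  obtain ⟨hp, hmin⟩ := PySem.Chars.find_spec hnn
  set k := (PySem.Chars.find rest ['\n', '-', '-', '>']).toNat with hk
  have : PySem.Chars.find (pre ++ '\n' :: rest) ['\n', '-', '-', '>']
      = ((pre.length + 1 + k : Nat) : Int) := by
    apply find_eq_of
    · rw [drop_big]; exact hp
    · intro i hi hcontra
      rcases lt_trichotomy i pre.length with h | h | h
      · exact no_occ_in_pre pre _ hpre i h _ hcontra
      · subst h
        rw [List.drop_left] at hcontra
        exact hr (by simpa using hcontra)
      · have hi' : i = pre.length + 1 + (i - pre.length - 1) := by omega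
        rw [hi', drop_big] at hcontra
        exact hmin (i - pre.length - 1) (by omega) hcontra
  rw [this]
  push_cast
  omega

theorem find_no_nl (cs : List Char) (h : '\n' ∉ cs) :
    PySem.Chars.find cs ['\n', '-', '-', '>'] = -1 := by
  rw [PySem.Chars.find_eq_neg_one_iff _ _]
  intro hinf
  exact h (hinf.subset (by simp))

-- every string with a newline splits as pre ++ '\n' :: rest with no '\n' in pre
theorem exists_nl_split (cs : List Char) (hnl : '\n' ∈ cs) :
    ∃ pre rest, '\n' ∉ pre ∧ cs = pre ++ '\n' :: rest := by
  induction cs with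
  | nil => simp at hnl
  | cons c cs' ih' =>
    by_cases hc : c = '\n'
    · exact ⟨[], cs', by simp, by simp [hc]⟩
    · have hnl' : '\n' ∈ cs' := by
        rcases List.mem_cons.mp hnl with h | h
        · exact absurd h.symm hc
        · exact h
      obtain ⟨p, r, h1, h2⟩ := ih' hnl'
      exact ⟨c :: p, r, by simp [h1]; exact fun he => hc he.symm, by simp [h2]⟩

-- the main loop invariant: A's line loop computes B's find-based expression, offset by acc
theorem main_loop (s2 : String) (plus : Int) :
    ∀ n (cs : List Char), cs.length = n → ∀ acc : Int,
      gaciLoop s2 plus (mySplit cs) acc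
        = (if PySem.Chars.startswith cs ['-', '-', '>'] then
            min (acc + plus) (PySem.Str.len s2 - 1)
          else if PySem.Chars.find cs ['\n', '-', '-', '>'] = -1 then 0
          else min (acc + PySem.Chars.find cs ['\n', '-', '-', '>'] + 1 + plus)
                   (PySem.Str.len s2 - 1)) := by
  intro n
  induction n using Nat.strong_induction_on with
  | _ n ih =>
    intro cs hlen acc
    by_cases hnl : '\n' ∈ cs
    · obtain ⟨pre, rest, hpre, hcs⟩ := exists_nl_split cs hnl
      subst hcs
      rw [mySplit_append_nl pre rest hpre, startswith_of_split]
      by_cases hmatch : PySem.Chars.startswith pre ['-', '-', '>']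
      · simp only [gaciLoop, hmatch, if_true]
      · have hmatch' : PySem.Chars.startswith pre ['-', '-', '>'] = false :=
          Bool.not_eq_true _ ▸ hmatch
        have hstep : gaciLoop s2 plus (pre :: mySplit rest) acc
            = gaciLoop s2 plus (mySplit rest) (acc + (pre.length : Int) + 1) := by
          simp [gaciLoop, hmatch', PySem.Chars.len]
        rw [hstep,
          ih rest.length (by subst hlen; simp; omega) rest rfl (acc + (pre.length : Int) + 1)]
        simp only [hmatch', Bool.false_eq_true, if_false]
        by_cases hrm : PySem.Chars.startswith rest ['-', '-', '>']
        · rw [if_pos hrm]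
          rw [PySem.Chars.startswith_iff] at hrm
          rw [find_split_hit pre rest hpre hrm, if_neg (by omega)]
        · have hrm' : PySem.Chars.startswith rest ['-', '-', '>'] = false :=
            Bool.not_eq_true _ ▸ hrm
          rw [if_neg hrm]
          have hrm'' : ¬ (['-', '-', '>'] <+: rest) := by
            intro h
            rw [(PySem.Chars.startswith_iff _ _).mpr h] at hrm'
            simp at hrm'
          by_cases hf : PySem.Chars.find rest ['\n', '-', '-', '>'] = -1
          · rw [if_pos hf, find_split_miss_none pre rest hpre hrm'' hf, if_pos rfl]
          · rw [if_neg hf, find_split_miss_some pre rest hpre hrm'' hf]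
            have hnn : 0 ≤ PySem.Chars.find rest ['\n', '-', '-', '>'] := by
              have := PySem.Chars.neg_one_le_find rest ['\n', '-', '-', '>']
              omega
            rw [if_neg (by omega)]
            omega
    · rw [mySplit_no_nl cs hnl]
      by_cases hmatch : PySem.Chars.startswith cs ['-', '-', '>']
      · simp [gaciLoop, hmatch]
      · simp [gaciLoop, hmatch, find_no_nl cs hnl]

-- ===== VERDICT (by name: the statement is the Claim_ definition above) =====
theorem get_arrow_char_index_spec : Claim_equal_get_arrow_char_index := by
  intro s2 plus _
  unfold Spec_get_arrow_char_index get_arrow_char_index get_arrow_char_index_alt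
  rw [splitOn_eq_mySplit, main_loop s2 plus s2.toList.length s2.toList rfl 0]
  have e1 : ("-->" : String).toList = ['-', '-', '>'] := rfl
  have e2 : ("\n-->" : String).toList = ['\n', '-', '-', '>'] := rfl
  simp only [PySem.Str.startswith_eq, PySem.Str.find_eq, e1, e2]
  split_ifs <;> omega
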